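-- pv_equiv track=rewrite | github.com/CS320EZMeet/EZMeet_Backend | accountProfile/models.py | generatePreferenceID
-- ===== SOURCE A (Python) =====
-- def generatePreferenceID(prefList):
--     preferences = ["restaurant", "nature", "museums", "entertainment", "shopping"]
--     nums = [16, 8, 4, 2, 1]
--     res = 0
--     for i in range(5):
--         if prefList.count(preferences[i]) > 0:
--             res += nums[i]
--
--     return res
-- ===== SOURCE B (Python) =====
-- def generatePreferenceID(prefList):
--     weights = {'restaurant': 16, 'nature': 8, 'museums': 4,
--                'entertainment': 2, 'shopping': 1}
--     res = 0
--     for item in prefList: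
--         res |= weights.get(item, 0)
--     return res
-- ===== Notes on version B (the rewrite author's own statement) =====
-- stated objective: idiomatic
-- what changed: B iterates over prefList once OR-ing bit weights from a dict, instead of A's five passes each scanning the whole list with .count; bitwise OR makes duplicates harmless.
import Mathlib
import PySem

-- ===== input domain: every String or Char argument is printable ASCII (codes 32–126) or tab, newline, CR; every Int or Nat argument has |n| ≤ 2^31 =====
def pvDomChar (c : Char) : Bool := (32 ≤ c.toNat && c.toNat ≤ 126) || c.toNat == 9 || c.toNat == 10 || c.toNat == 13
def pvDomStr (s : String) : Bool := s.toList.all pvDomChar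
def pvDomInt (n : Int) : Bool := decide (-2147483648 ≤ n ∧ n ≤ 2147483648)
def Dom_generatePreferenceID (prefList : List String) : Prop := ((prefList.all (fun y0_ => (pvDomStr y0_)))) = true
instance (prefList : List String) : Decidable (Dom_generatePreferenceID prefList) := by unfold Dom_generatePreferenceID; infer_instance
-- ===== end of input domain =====

-- B replaces A's five list-scanning .count passes by one pass over prefList OR-ing bit weights looked up in a dict (idiomatic).


-- ===== PORT A =====
def generatePreferenceID (prefList : List String) : Int :=
  let preferences : List String := ["restaurant", "nature", "museums", "entertainment", "shopping"]
  let nums : List Int := [16, 8, 4, 2, 1]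
  (PySem.List.pyRange 0 5 1).foldl
    (fun res i =>
      if PySem.List.count prefList (PySem.List.pyGetD preferences i "") > 0 then
        res + PySem.List.pyGetD nums i 0
      else res) 0

-- ===== PORT B =====
def generatePreferenceID_alt (prefList : List String) : Int :=
  let weights : PySem.Dict String Int :=
    PySem.Dict.ofList [("restaurant", 16), ("nature", 8), ("museums", 4),
                       ("entertainment", 2), ("shopping", 1)]
  prefList.foldl (fun res item => PySem.Int.bor res (weights.getD item 0)) 0

-- ===== PRECONDITION & SPEC =====
def Spec_generatePreferenceID (prefList : List String) (out : Int) : Prop := out = generatePreferenceID_alt prefList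
instance (prefList : List String) (out : Int) : Decidable (Spec_generatePreferenceID prefList out) := by unfold Spec_generatePreferenceID; infer_instance

-- ===== CLAIM (what is proved, stated in full; the proofs are below) =====
def Claim_equal_generatePreferenceID : Prop := ∀ (prefList : List String), Dom_generatePreferenceID prefList → Spec_generatePreferenceID prefList (generatePreferenceID prefList)

-- ===== LEMMAS AND PROOFS =====

-- the common result as a function of the five membership booleans
def prefMask (b1 b2 b3 b4 b5 : Bool) : Int :=
  (if b1 then 16 else 0) + (if b2 then 8 else 0) + (if b3 then 4 else 0) +
  (if b4 then 2 else 0) + (if b5 then 1 else 0)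

-- Nat-level version of prefMask, and of B's per-item weight and fold (proof helpers only)
def prefMaskN (b1 b2 b3 b4 b5 : Bool) : Nat :=
  (if b1 then 16 else 0) + (if b2 then 8 else 0) + (if b3 then 4 else 0) +
  (if b4 then 2 else 0) + (if b5 then 1 else 0)

def wOf (s : String) : Int :=
  (PySem.Dict.ofList [("restaurant", (16:Int)), ("nature", 8), ("museums", 4),
                      ("entertainment", 2), ("shopping", 1)]).getD s 0

def wNat (s : String) : Nat :=
  if s = "restaurant" then 16 else if s = "nature" then 8 else if s = "museums" then 4
  else if s = "entertainment" then 2 else if s = "shopping" then 1 else 0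

theorem wOf_eq (s : String) : wOf s = ((wNat s : Nat) : Int) := by
  by_cases h1 : s = "restaurant"; · subst h1; decide
  by_cases h2 : s = "nature"; · subst h2; decide
  by_cases h3 : s = "museums"; · subst h3; decide
  by_cases h4 : s = "entertainment"; · subst h4; decide
  by_cases h5 : s = "shopping"; · subst h5; decide
  have hm : PySem.Dict.ofList [("restaurant", (16:Int)), ("nature", 8), ("museums", 4),
      ("entertainment", 2), ("shopping", 1)] =
      PySem.Dict.mk [("restaurant", (16:Int)), ("nature", 8), ("museums", 4),
      ("entertainment", 2), ("shopping", 1)] := by decide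
  have e1 : ("restaurant" == s) = false := beq_eq_false_iff_ne.mpr (Ne.symm h1)
  have e2 : ("nature" == s) = false := beq_eq_false_iff_ne.mpr (Ne.symm h2)
  have e3 : ("museums" == s) = false := beq_eq_false_iff_ne.mpr (Ne.symm h3)
  have e4 : ("entertainment" == s) = false := beq_eq_false_iff_ne.mpr (Ne.symm h4)
  have e5 : ("shopping" == s) = false := beq_eq_false_iff_ne.mpr (Ne.symm h5)
  simp [wOf, wNat, hm, PySem.Dict.getD, PySem.Dict.get?,
    h1, h2, h3, h4, h5, e1, e2, e3, e4, e5]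

theorem foldl_bor_cast (xs : List String) (m : Nat) :
    xs.foldl (fun res item => PySem.Int.bor res (wOf item)) ((m : Nat) : Int) =
      ((xs.foldl (fun res item => res ||| wNat item) m : Nat) : Int) := by
  induction xs generalizing m with
  | nil => rfl
  | cons x t ih =>
    simp only [List.foldl]
    rw [wOf_eq, PySem.Int.bor_natCast, ih]

theorem foldl_lor_shift (xs : List String) (m : Nat) :
    xs.foldl (fun res item => res ||| wNat item) m =
      m ||| xs.foldl (fun res item => res ||| wNat item) 0 := by
  induction xs generalizing m with
  | nil => simp
  | cons x t ih =>
    simp only [List.foldl]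
    rw [ih (m ||| wNat x), ih (0 ||| wNat x), Nat.zero_or, Nat.or_assoc]

theorem natFold_eq_mask (xs : List String) :
    xs.foldl (fun res item => res ||| wNat item) 0 =
      prefMaskN (xs.contains "restaurant") (xs.contains "nature") (xs.contains "museums")
                (xs.contains "entertainment") (xs.contains "shopping") := by
  induction xs with
  | nil => decide
  | cons x t ih =>
    rw [List.foldl, foldl_lor_shift, ih, Nat.zero_or]
    simp only [List.contains_cons]
    by_cases h1 : x = "restaurant"
    · subst h1
      generalize t.contains "restaurant" = c1
      generalize t.contains "nature" = c2
      generalize t.contains "museums" = c3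
      generalize t.contains "entertainment" = c4
      generalize t.contains "shopping" = c5
      revert c1 c2 c3 c4 c5; decide
    by_cases h2 : x = "nature"
    · subst h2
      generalize t.contains "restaurant" = c1
      generalize t.contains "nature" = c2
      generalize t.contains "museums" = c3
      generalize t.contains "entertainment" = c4
      generalize t.contains "shopping" = c5
      revert c1 c2 c3 c4 c5; decide
    by_cases h3 : x = "museums"
    · subst h3
      generalize t.contains "restaurant" = c1
      generalize t.contains "nature" = c2
      generalize t.contains "museums" = c3
      generalize t.contains "entertainment" = c4
      generalize t.contains "shopping" = c5
      revert c1 c2 c3 c4 c5; decide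
    by_cases h4 : x = "entertainment"
    · subst h4
      generalize t.contains "restaurant" = c1
      generalize t.contains "nature" = c2
      generalize t.contains "museums" = c3
      generalize t.contains "entertainment" = c4
      generalize t.contains "shopping" = c5
      revert c1 c2 c3 c4 c5; decide
    by_cases h5 : x = "shopping"
    · subst h5
      generalize t.contains "restaurant" = c1
      generalize t.contains "nature" = c2
      generalize t.contains "museums" = c3
      generalize t.contains "entertainment" = c4
      generalize t.contains "shopping" = c5
      revert c1 c2 c3 c4 c5; decide
    have hb : ∀ s : String, s ≠ x → ((s == x) || t.contains s) = t.contains s := by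
      intro s hs
      simp [beq_eq_false_iff_ne.mpr hs]
    rw [hb _ (fun h => h1 h.symm), hb _ (fun h => h2 h.symm), hb _ (fun h => h3 h.symm),
       hb _ (fun h => h4 h.symm), hb _ (fun h => h5 h.symm)]
    simp [wNat, h1, h2, h3, h4, h5]

theorem gen_b_eq_mask (xs : List String) :
    generatePreferenceID_alt xs =
      prefMask (xs.contains "restaurant") (xs.contains "nature") (xs.contains "museums")
               (xs.contains "entertainment") (xs.contains "shopping") := by
  have h0 : generatePreferenceID_alt xs =
      xs.foldl (fun res item => PySem.Int.bor res (wOf item)) (((0:Nat) : Nat) : Int) := by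
    simp only [generatePreferenceID_alt, wOf, Nat.cast_zero]
  rw [h0, foldl_bor_cast, natFold_eq_mask]
  generalize xs.contains "restaurant" = c1
  generalize xs.contains "nature" = c2
  generalize xs.contains "museums" = c3
  generalize xs.contains "entertainment" = c4
  generalize xs.contains "shopping" = c5
  revert c1 c2 c3 c4 c5; decide

theorem gen_a_eq_mask (xs : List String) :
    generatePreferenceID xs =
      prefMask (xs.contains "restaurant") (xs.contains "nature") (xs.contains "museums")
               (xs.contains "entertainment") (xs.contains "shopping") := by
  have hrange : PySem.List.pyRange 0 5 1 = [0, 1, 2, 3, 4] := by decide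
  have hcond : ∀ s : String, (PySem.List.count xs s > 0) = (xs.contains s = true) := by
    intro s
    simp only [PySem.List.count_eq]
    apply propext
    rw [gt_iff_lt, List.count_pos_iff]
    simp
  simp only [generatePreferenceID, hrange, List.foldl,
    show PySem.List.pyGetD ["restaurant", "nature", "museums", "entertainment", "shopping"] 0 "" = "restaurant" from by decide,
    show PySem.List.pyGetD ["restaurant", "nature", "museums", "entertainment", "shopping"] 1 "" = "nature" from by decide,
    show PySem.List.pyGetD ["restaurant", "nature", "museums", "entertainment", "shopping"] 2 "" = "museums" from by decide,
    show PySem.List.pyGetD ["restaurant", "nature", "museums", "entertainment", "shopping"] 3 "" = "entertainment" from by decide,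
    show PySem.List.pyGetD ["restaurant", "nature", "museums", "entertainment", "shopping"] 4 "" = "shopping" from by decide,
    show PySem.List.pyGetD [(16:Int), 8, 4, 2, 1] 0 0 = 16 from by decide,
    show PySem.List.pyGetD [(16:Int), 8, 4, 2, 1] 1 0 = 8 from by decide,
    show PySem.List.pyGetD [(16:Int), 8, 4, 2, 1] 2 0 = 4 from by decide,
    show PySem.List.pyGetD [(16:Int), 8, 4, 2, 1] 3 0 = 2 from by decide,
    show PySem.List.pyGetD [(16:Int), 8, 4, 2, 1] 4 0 = 1 from by decide,
    hcond]
  simp only [prefMask]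
  generalize xs.contains "restaurant" = c1
  generalize xs.contains "nature" = c2
  generalize xs.contains "museums" = c3
  generalize xs.contains "entertainment" = c4
  generalize xs.contains "shopping" = c5
  rcases c1 <;> rcases c2 <;> rcases c3 <;> rcases c4 <;> rcases c5 <;> norm_num

-- ===== VERDICT (by name: the statement is the Claim_ definition above) =====
theorem generatePreferenceID_spec : Claim_equal_generatePreferenceID := by
  intro xs _
  show generatePreferenceID xs = generatePreferenceID_alt xs
  rw [gen_a_eq_mask, gen_b_eq_mask]
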